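-- pv_equiv track=rewrite | github.com/felipemartenexen/fas_tsbio | scripts/02_gerar_catalogo.py | inferir_unidade
-- ===== SOURCE A (Python) =====
-- from typing import List
--
-- UNIT_SUFFIX_TO_UNIT = {
--     "perc": "%",
--     "ha": "ha",
--     "km2": "km²",
--     "m2": "m²",
--     "rs": "R$",
--     "pessoas": "pessoas",
-- }
--
-- def inferir_unidade(variaveis: List[str]) -> str:
--     units = set()
--     for v in variaveis:
--         suf = str(v).split("_")[-1].lower()
--         u = UNIT_SUFFIX_TO_UNIT.get(suf, "")
--         if u:
--             units.add(u)
--     if len(units) == 1: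
--         return list(units)[0]
--     if len(units) > 1:
--         return "multiplas"
--     return ""
-- ===== SOURCE B (Python) =====
-- from typing import List
--
-- UNIT_SUFFIX_TO_UNIT = {
--     "perc": "%",
--     "ha": "ha",
--     "km2": "km²",
--     "m2": "m²",
--     "rs": "R$",
--     "pessoas": "pessoas",
-- }
--
-- # The six possible units, fixed in advance.
-- KNOWN_UNITS = ["%", "ha", "km²", "m²", "R$", "pessoas"]
--
-- def inferir_unidade(variaveis: List[str]) -> str:
--     def unit_of(v):
--         return UNIT_SUFFIX_TO_UNIT.get(str(v).split("_")[-1].lower(), "")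
--     # Inverted traversal: probe each candidate unit against the variable list.
--     matched = [u for u in KNOWN_UNITS if any(unit_of(v) == u for v in variaveis)]
--     if not matched:
--         return ""
--     if len(matched) == 1:
--         return matched[0]
--     return "multiplas"
-- ===== Notes on version B (the rewrite author's own statement) =====
-- stated objective: alternative
-- what changed: Inverts the traversal: instead of scanning the variables and accumulating a set of units, B iterates over the fixed list of six candidate units and keeps each one that some variable maps to, then decides from that filtered candidate list.
import Mathlib
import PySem

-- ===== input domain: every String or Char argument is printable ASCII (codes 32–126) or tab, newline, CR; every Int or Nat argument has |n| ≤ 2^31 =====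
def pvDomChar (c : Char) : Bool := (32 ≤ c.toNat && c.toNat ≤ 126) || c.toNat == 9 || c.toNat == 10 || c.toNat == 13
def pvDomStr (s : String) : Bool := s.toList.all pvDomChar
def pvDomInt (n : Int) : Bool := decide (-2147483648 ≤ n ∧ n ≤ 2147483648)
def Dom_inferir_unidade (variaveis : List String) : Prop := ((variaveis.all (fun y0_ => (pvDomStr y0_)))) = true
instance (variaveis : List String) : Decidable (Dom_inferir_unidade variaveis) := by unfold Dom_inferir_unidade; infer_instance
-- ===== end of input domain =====

-- B inverts the traversal: instead of scanning the variables and accumulating a set of units,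
-- it probes each of the six fixed candidate units against the variable list (objective: alternative).

-- ===== PORT A =====
-- shared module constant UNIT_SUFFIX_TO_UNIT (both Pythons use the same dict)
def UNIT_SUFFIX_TO_UNIT : PySem.Dict String String :=
  PySem.Dict.ofList
    [("perc", "%"), ("ha", "ha"), ("km2", "km²"), ("m2", "m²"), ("rs", "R$"), ("pessoas", "pessoas")]

-- suf = str(v).split("_")[-1].lower(); u = UNIT_SUFFIX_TO_UNIT.get(suf, "")
-- (split always yields a nonempty list, so the [-1] index never fails)
def unitOf (v : String) : String :=
  PySem.Dict.getD UNIT_SUFFIX_TO_UNIT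
    (PySem.Str.lower ((PySem.List.pyGet? ((PySem.Str.split? v "_").getD []) (-1)).getD "")) ""

def inferir_unidade (variaveis : List String) : String :=
  let units : PySem.Set String :=
    variaveis.foldl (fun s v => let u := unitOf v; if u ≠ "" then PySem.Set.add s u else s)
      PySem.Set.empty
  if units.length = 1 then units.headD ""      -- list(units)[0] on a singleton set
  else if units.length > 1 then "multiplas"
  else ""

-- ===== PORT B =====
-- KNOWN_UNITS = the six possible units, fixed in advance
def KNOWN_UNITS : List String := ["%", "ha", "km²", "m²", "R$", "pessoas"]

-- matched = [u for u in KNOWN_UNITS if any(unit_of(v) == u for v in variaveis)]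
def inferir_unidade_alt (variaveis : List String) : String :=
  let matched := KNOWN_UNITS.filter (fun u => variaveis.any (fun v => unitOf v == u))
  if matched = [] then ""
  else if matched.length = 1 then matched.headD ""
  else "multiplas"

-- ===== PRECONDITION & SPEC =====
def Spec_inferir_unidade (variaveis : List String) (out : String) : Prop := out = inferir_unidade_alt variaveis
instance (variaveis : List String) (out : String) : Decidable (Spec_inferir_unidade variaveis out) := by unfold Spec_inferir_unidade; infer_instance

-- ===== CLAIM (what is proved, stated in full; the proofs are below) =====
def Claim_equal_inferir_unidade : Prop := ∀ (variaveis : List String), Dom_inferir_unidade variaveis → Spec_inferir_unidade variaveis (inferir_unidade variaveis)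

-- ===== LEMMAS AND PROOFS =====

def pvStep (s : PySem.Set String) (v : String) : PySem.Set String :=
  if unitOf v ≠ "" then PySem.Set.add s (unitOf v) else s

-- every nonempty value of unitOf is one of the six candidates
theorem getD_mem (k : String) :
    PySem.Dict.getD UNIT_SUFFIX_TO_UNIT k "" = "" ∨ PySem.Dict.getD UNIT_SUFFIX_TO_UNIT k "" ∈ KNOWN_UNITS := by
  unfold PySem.Dict.getD PySem.Dict.get?
  rcases h : List.find? (fun p => p.1 == k) UNIT_SUFFIX_TO_UNIT.items with _ | ⟨a, b⟩
  · left; simp [h]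
  · right
    have hm := List.mem_of_find?_eq_some h
    have hitems : UNIT_SUFFIX_TO_UNIT.items =
        [("perc", "%"), ("ha", "ha"), ("km2", "km²"), ("m2", "m²"), ("rs", "R$"), ("pessoas", "pessoas")] := by
      decide
    rw [hitems] at hm
    simp [h]
    fin_cases hm <;> simp [KNOWN_UNITS]

theorem unitOf_mem (v : String) : unitOf v = "" ∨ unitOf v ∈ KNOWN_UNITS := getD_mem _

theorem known_ne (x : String) (h : x ∈ KNOWN_UNITS) : x ≠ "" := by
  fin_cases h <;> decide

theorem mem_fold (l : List String) (s : PySem.Set String) (x : String) :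
    x ∈ l.foldl pvStep s ↔ x ∈ s ∨ ∃ v ∈ l, unitOf v = x ∧ x ≠ "" := by
  induction l generalizing s with
  | nil => simp
  | cons v t ih =>
    rw [List.foldl_cons, ih]
    unfold pvStep
    split_ifs with h
    · rw [PySem.Set.mem_add]
      constructor
      · rintro ((hs | hx) | hr)
        · exact Or.inl hs
        · exact Or.inr ⟨v, by simp, hx.symm, hx ▸ h⟩
        · rcases hr with ⟨w, hw, hu⟩; exact Or.inr ⟨w, by simp [hw], hu⟩
      · rintro (hs | ⟨w, hw, hu, hne⟩)
        · exact Or.inl (Or.inl hs)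
        · rcases List.mem_cons.mp hw with rfl | hw
          · exact Or.inl (Or.inr hu.symm)
          · exact Or.inr ⟨w, hw, hu, hne⟩
    · simp only [ne_eq, not_not] at h
      constructor
      · rintro (hs | hr)
        · exact Or.inl hs
        · rcases hr with ⟨w, hw, hu⟩; exact Or.inr ⟨w, by simp [hw], hu⟩
      · rintro (hs | ⟨w, hw, hu, hne⟩)
        · exact Or.inl hs
        · rcases List.mem_cons.mp hw with rfl | hw
          · exact absurd (hu.symm.trans h) hne
          · exact Or.inr ⟨w, hw, hu, hne⟩

theorem nodup_fold (l : List String) (s : PySem.Set String) (hs : s.Nodup) :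
    (l.foldl pvStep s).Nodup := by
  induction l generalizing s with
  | nil => exact hs
  | cons v t ih =>
    rw [List.foldl_cons]
    apply ih
    unfold pvStep
    split_ifs
    · exact PySem.Set.nodup_add _ _ hs
    · exact hs

theorem perm_fold_matched (variaveis : List String) :
    List.Perm (variaveis.foldl pvStep PySem.Set.empty)
      (KNOWN_UNITS.filter (fun u => variaveis.any (fun v => unitOf v == u))) := by
  rw [List.perm_ext_iff_of_nodup (nodup_fold variaveis PySem.Set.empty List.nodup_nil)
      (List.Nodup.filter _ (by decide))]
  intro x
  rw [mem_fold, List.mem_filter]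
  simp only [PySem.Set.empty, List.not_mem_nil, false_or, List.any_eq_true, beq_iff_eq]
  constructor
  · rintro ⟨v, hv, hu, hne⟩
    refine ⟨?_, v, hv, hu⟩
    rcases unitOf_mem v with h0 | h0
    · exact absurd (h0 ▸ hu).symm hne
    · exact hu ▸ h0
  · rintro ⟨hk, v, hv, hu⟩
    exact ⟨v, hv, hu, known_ne x hk⟩

-- ===== VERDICT (by name: the statement is the Claim_ definition above) =====
theorem inferir_unidade_spec : Claim_equal_inferir_unidade := by
  intro variaveis _
  show inferir_unidade variaveis = inferir_unidade_alt variaveis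
  have hperm := perm_fold_matched variaveis
  set S := variaveis.foldl pvStep PySem.Set.empty with hS
  set M := KNOWN_UNITS.filter (fun u => variaveis.any (fun v => unitOf v == u)) with hM
  have hA : inferir_unidade variaveis =
      (if S.length = 1 then S.headD "" else if S.length > 1 then "multiplas" else "") := rfl
  have hB : inferir_unidade_alt variaveis =
      (if M = [] then "" else if M.length = 1 then M.headD "" else "multiplas") := rfl
  rw [hA, hB]
  have hlen := hperm.length_eq
  match hMc : M with
  | [] =>
    simp only [List.length_nil] at hlen
    simp [hlen]
  | [u] =>
    have hSu : S = [u] := List.perm_singleton.mp hperm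
    simp [hSu]
  | u :: w :: rest =>
    simp only [List.length_cons] at hlen
    have h1 : ¬ S.length = 1 := by omega
    have h2 : S.length > 1 := by omega
    simp [h1, h2]
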